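-- pv_equiv track=rewrite | github.com/li-xin-yi/fb-hacker-cup-2022 | qual/B2.py | solve
-- ===== SOURCE A (Python) =====
-- def solve(n, m, grid):
--     if n == 1 or m == 1:
--         for i in range(n):
--             for j in range(m):
--                 if grid[i][j] == '^':
--                     return "Impossible"
--         return "Possible" + '\n' + '\n'.join(grid)
--
--     q = [(i, j) for i in range(n) for j in range(m) if grid[i][j] == '#']
--     seen = set(q)
--     nei = [[4]*m for _ in range(n)]
--     for i in range(n):
--         nei[i][0] -= 1
--         nei[i][-1] -= 1
--     for j in range(m):
--         nei[0][j] -= 1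
--         nei[-1][j] -= 1
--
--     for i, j in q:
--         for x, y in [(i-1, j), (i+1, j), (i, j-1), (i, j+1)]:
--             if 0 <= x < n and 0 <= y < m:
--                 nei[x][y] -= 1
--                 if nei[x][y] < 2 and (x, y) not in seen:
--                     if grid[x][y] == '^':
--                         return "Impossible"
--                     seen.add((x, y))
--                     q.append((x, y))
--     grid = [list(row) for row in grid]
--     for i in range(n):
--         for j in range(m):
--             if (i, j) not in seen:
--                 grid[i][j] = '^'
--     grid = [''.join(row) for row in grid]
--     return "Possible" + '\n' + '\n'.join(grid)
-- ===== SOURCE B (Python) =====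
-- def solve(n, m, grid):
--     if n == 1 or m == 1:
--         for i in range(n):
--             for j in range(m):
--                 if grid[i][j] == '^':
--                     return "Impossible"
--         return "Possible" + '\n' + '\n'.join(grid)
--
--     # fixpoint relaxation: repeatedly sweep the whole grid, keeping any cell
--     # whose in-grid neighbours include at most one not-yet-kept cell
--     kept = [[grid[i][j] == '#' for j in range(m)] for i in range(n)]
--     changed = True
--     while changed:
--         changed = False
--         for i in range(n):
--             for j in range(m):
--                 if not kept[i][j]:
--                     free = sum(1 for x, y in ((i - 1, j), (i + 1, j), (i, j - 1), (i, j + 1))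
--                                if 0 <= x < n and 0 <= y < m and not kept[x][y])
--                     if free <= 1:
--                         kept[i][j] = True
--                         changed = True
--
--     if any(kept[i][j] and grid[i][j] == '^' for i in range(n) for j in range(m)):
--         return "Impossible"
--     out = [list(row) for row in grid]
--     for i in range(n):
--         for j in range(m):
--             if not kept[i][j]:
--                 out[i][j] = '^'
--     return "Possible" + '\n' + '\n'.join(''.join(row) for row in out)
-- ===== Notes on version B (the rewrite author's own statement) =====
-- stated objective: alternative
-- what changed: A's worklist BFS with incrementally decremented per-cell neighbour counters and an eager mid-loop Impossible return is replaced by repeated full-grid relaxation sweeps over a boolean kept-grid until a fixpoint, with the '^' check done once at the end (the n==1/m==1 special case is kept).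
-- outside the precondition, e.g. on solve(1, 2, ['^']): A returns 'Impossible', B returns 'Impossible'
import Mathlib
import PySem

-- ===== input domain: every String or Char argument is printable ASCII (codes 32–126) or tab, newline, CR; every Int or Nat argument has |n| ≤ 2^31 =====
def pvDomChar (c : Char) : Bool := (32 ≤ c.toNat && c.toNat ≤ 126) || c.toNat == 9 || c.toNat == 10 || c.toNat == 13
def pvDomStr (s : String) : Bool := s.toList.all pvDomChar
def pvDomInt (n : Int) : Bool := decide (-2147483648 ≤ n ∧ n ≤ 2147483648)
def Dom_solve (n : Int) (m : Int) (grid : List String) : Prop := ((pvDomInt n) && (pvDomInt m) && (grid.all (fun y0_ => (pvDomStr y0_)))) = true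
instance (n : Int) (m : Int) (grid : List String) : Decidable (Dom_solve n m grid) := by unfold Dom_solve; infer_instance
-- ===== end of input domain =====

-- B replaces A's incremental BFS queue + decremented neighbour counters by repeated
-- full-grid relaxation sweeps over a boolean kept-grid until a fixpoint (alternative
-- decomposition, not faster); the n==1/m==1 special case is kept.


-- ===== PORT A =====
-- grid[i][j] (exact where Python's indexing is in range; Pre_solve confines its use to that)
def gridAt (grid : List String) (i j : Int) : Char :=
  (PySem.Str.pyGet? ((PySem.List.pyGet? grid i).getD "") j).getD ' '

-- the Python guard '0 <= x < n and 0 <= y < m'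
def inGb (n m : Int) (p : Int × Int) : Bool :=
  decide (0 ≤ p.1) && decide (p.1 < n) && decide (0 ≤ p.2) && decide (p.2 < m)

-- the literal list [(i-1, j), (i+1, j), (i, j-1), (i, j+1)]
def dirs (p : Int × Int) : List (Int × Int) :=
  [(p.1 - 1, p.2), (p.1 + 1, p.2), (p.1, p.2 - 1), (p.1, p.2 + 1)]

-- l[k] = f(l[k]) with Python index resolution (negative k from the end; an
-- out-of-range k raises in Python — only reachable outside Pre_solve, where modify is id)
def lmod {α : Type} (xs : List α) (k : Int) (f : α → α) : List α :=
  if 0 ≤ k then xs.modify k.toNat f else xs.modify (xs.length - (-k).toNat) f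

-- g[i][j], with default d out of range (Python raises there; outside Pre_solve)
def get2 {α : Type} (g : List (List α)) (i j : Int) (d : α) : α :=
  ((PySem.List.pyGet? ((PySem.List.pyGet? g i).getD []) j).getD d)

-- g[i][j] = f(g[i][j])
def mod2 {α : Type} (g : List (List α)) (i j : Int) (f : α → α) : List (List α) :=
  lmod g i (fun row => lmod row j f)

-- the body of A's inner 'for x, y in [...]' loop; none = the 'return "Impossible"'
def stepA (n m : Int) (grid : List String)
    (st : List (Int × Int) × PySem.Set (Int × Int) × List (List Int)) (p : Int × Int) :
    Option (List (Int × Int) × PySem.Set (Int × Int) × List (List Int)) :=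
  if inGb n m p then
    let nei' := mod2 st.2.2 p.1 p.2 (· - 1)
    if get2 nei' p.1 p.2 0 < 2 ∧ ¬ (PySem.Set.contains st.2.1 p = true) then
      if gridAt grid p.1 p.2 == '^' then none
      else some (st.1 ++ [p], PySem.Set.add st.2.1 p, nei')
    else some (st.1, st.2.1, nei')
  else some st

-- A's 'for i, j in q' loop (q grows while iterated; k is the iterator's index;
-- the fuel only makes the recursion structural — it is proved sufficient below)
def bfsA (n m : Int) (grid : List String) :
    Nat → Nat → List (Int × Int) × PySem.Set (Int × Int) × List (List Int) →
    Option (List (Int × Int) × PySem.Set (Int × Int) × List (List Int))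
  | 0, _, st => some st
  | fuel + 1, k, st =>
    match PySem.List.pyGet? st.1 (k : Int) with
    | none => some st
    | some c =>
      match (dirs c).foldl (fun acc p => acc.bind (fun s => stepA n m grid s p)) (some st) with
      | none => none
      | some st' => bfsA n m grid fuel (k + 1) st'

def solve (n : Int) (m : Int) (grid : List String) : String :=
  if n = 1 ∨ m = 1 then
    if (PySem.List.pyRange 0 n 1).any (fun i =>
        (PySem.List.pyRange 0 m 1).any (fun j => gridAt grid i j == '^')) then
      "Impossible"
    else "Possible" ++ "\n" ++ PySem.Str.join "\n" grid
  else
    let q0 := (PySem.List.pyRange 0 n 1).flatMap (fun i =>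
      ((PySem.List.pyRange 0 m 1).filter (fun j => gridAt grid i j == '#')).map (fun j => (i, j)))
    let seen0 := PySem.Set.ofList q0
    let nei0 : List (List Int) := List.replicate n.toNat (List.replicate m.toNat 4)
    let nei1 := (PySem.List.pyRange 0 n 1).foldl
      (fun nei i => lmod (lmod nei i (fun r => lmod r 0 (· - 1))) i (fun r => lmod r (-1) (· - 1))) nei0
    let nei2 := (PySem.List.pyRange 0 m 1).foldl
      (fun nei j => mod2 (mod2 nei 0 j (· - 1)) (-1) j (· - 1)) nei1
    match bfsA n m grid (n.toNat * m.toNat + 1) 0 (q0, seen0, nei2) with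
    | none => "Impossible"
    | some (_, seen, _) =>
      let g2 := grid.map (fun row => row.toList)
      let g3 := (PySem.List.pyRange 0 n 1).foldl (fun g i =>
        (PySem.List.pyRange 0 m 1).foldl (fun g j =>
          if ¬ (PySem.Set.contains seen (i, j) = true) then mod2 g i j (fun _ => '^') else g) g) g2
      "Possible" ++ "\n" ++ PySem.Str.join "\n" (g3.map String.ofList)

-- ===== PORT B =====
-- one full scan of the grid: mark every unkept cell with at most one unkept
-- in-grid neighbour; the Bool records whether the scan changed anything
def passB (n m : Int) (st : List (List Bool) × Bool) : List (List Bool) × Bool :=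
  (PySem.List.pyRange 0 n 1).foldl (fun st i =>
    (PySem.List.pyRange 0 m 1).foldl (fun st j =>
      if !get2 st.1 i j false then
        if (dirs (i, j)).countP (fun p => inGb n m p && !get2 st.1 p.1 p.2 false) ≤ 1 then
          (mod2 st.1 i j (fun _ => true), true)
        else st
      else st) st) st

-- B's 'while changed' loop (fuel only makes it structural; proved sufficient below)
def sweepsB (n m : Int) : Nat → List (List Bool) → List (List Bool)
  | 0, kept => kept
  | fuel + 1, kept =>
    match passB n m (kept, false) with
    | (kept', true) => sweepsB n m fuel kept'
    | (kept', false) => kept'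

def solve_alt (n : Int) (m : Int) (grid : List String) : String :=
  if n = 1 ∨ m = 1 then
    if (PySem.List.pyRange 0 n 1).any (fun i =>
        (PySem.List.pyRange 0 m 1).any (fun j => gridAt grid i j == '^')) then
      "Impossible"
    else "Possible" ++ "\n" ++ PySem.Str.join "\n" grid
  else
    let kept0 := (PySem.List.pyRange 0 n 1).map (fun i =>
      (PySem.List.pyRange 0 m 1).map (fun j => gridAt grid i j == '#'))
    let kept := sweepsB n m (n.toNat * m.toNat + 2) kept0
    if (PySem.List.pyRange 0 n 1).any (fun i =>
        (PySem.List.pyRange 0 m 1).any (fun j =>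
          get2 kept i j false && (gridAt grid i j == '^'))) then
      "Impossible"
    else
      let out0 := grid.map (fun row => row.toList)
      let out := (PySem.List.pyRange 0 n 1).foldl (fun g i =>
        (PySem.List.pyRange 0 m 1).foldl (fun g j =>
          if ¬ (get2 kept i j false = true) then mod2 g i j (fun _ => '^') else g) g) out0
      "Possible" ++ "\n" ++ PySem.Str.join "\n" (out.map String.ofList)

-- ===== PRECONDITION & SPEC =====
-- Pre_solve excludes exactly the malformed inputs on which A raises IndexError
-- (fewer than n rows, or a row among the first n shorter than m); on a few such
-- degenerate n==1/m==1 grids A happens to return "Impossible" early, having met a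
-- '^' before the first missing cell — those accidental early exits are excluded too
-- (B also answers "Impossible" there).
def Pre_solve (n : Int) (m : Int) (grid : List String) : Prop :=
  if n = 1 ∨ m = 1 then
    n ≤ 0 ∨ m ≤ 0 ∨ (n ≤ (grid.length : Int) ∧ ∀ s ∈ List.take n.toNat grid, m ≤ (s.toList.length : Int))
  else if 2 ≤ n ∧ 2 ≤ m then
    n ≤ (grid.length : Int) ∧ ∀ s ∈ List.take n.toNat grid, m ≤ (s.toList.length : Int)
  else n ≤ 0 ∧ m ≤ 0
instance (n : Int) (m : Int) (grid : List String) : Decidable (Pre_solve n m grid) := by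
  unfold Pre_solve; infer_instance

def pvWitness_solve : Int × Int × List String := (2, 2, ["#.", ".^"])

def Spec_solve (n : Int) (m : Int) (grid : List String) (out : String) : Prop := out = solve_alt n m grid
instance (n : Int) (m : Int) (grid : List String) (out : String) : Decidable (Spec_solve n m grid out) := by
  unfold Spec_solve; infer_instance

-- ===== CLAIM (what is proved, stated in full; the proofs are below) =====
def Claim_equal_solve : Prop := ∀ (n : Int) (m : Int) (grid : List String),
  Dom_solve n m grid → Pre_solve n m grid → Spec_solve n m grid (solve n m grid)

-- ===== LEMMAS AND PROOFS =====

-- ---- stage 0: 2-D list access ----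

def at2 {α : Type} (g : List (List α)) (i j : Nat) (d : α) : α := ((g[i]?.getD [])[j]?).getD d

def Sh2 {α : Type} (g : List (List α)) (N M : Nat) : Prop :=
  g.length = N ∧ ∀ r ∈ g, r.length = M

theorem get2_eq_at2 {α : Type} (g : List (List α)) {i j : Int} (hi : 0 ≤ i) (hj : 0 ≤ j) (d : α) :
    get2 g i j d = at2 g i.toNat j.toNat d := by
  unfold get2 at2
  rw [PySem.List.pyGet?_of_nonneg _ hi, PySem.List.pyGet?_of_nonneg _ hj]

theorem lmod_of_nonneg {α : Type} (xs : List α) {k : Int} (h : 0 ≤ k) (f : α → α) :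
    lmod xs k f = xs.modify k.toNat f := by simp [lmod, h]

theorem lmod_neg_one {α : Type} (xs : List α) (f : α → α) :
    lmod xs (-1) f = xs.modify (xs.length - 1) f := by simp [lmod]

theorem at2_modify {α : Type} (g : List (List α)) (a b i j : Nat) (f : α → α) (d : α) :
    at2 (g.modify a (fun r => r.modify b f)) i j d =
      if a = i ∧ b = j ∧ i < g.length ∧ j < (g[i]?.getD []).length then f (at2 g i j d)
      else at2 g i j d := by
  unfold at2
  rw [List.getElem?_modify]
  by_cases hai : a = i
  case neg =>
    have h0 : ((fun r => if a = i then r.modify b f else r) <$> g[i]?) = g[i]? := by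
      cases g[i]? <;> simp [hai]
    rw [h0, if_neg (by tauto)]
  case pos =>
    subst hai
    cases hgi : g[a]? with
    | none =>
      have hlen : g.length ≤ a := List.getElem?_eq_none_iff.mp hgi
      rw [if_neg (by rintro ⟨_, _, h3, _⟩; omega)]
      simp
    | some r =>
      have ha : a < g.length := (List.getElem?_eq_some_iff.mp hgi).1
      have hred : ((fun r => if a = a then r.modify b f else r) <$> some r) = some (r.modify b f) := by simp
      rw [hred]
      simp only [Option.getD_some, true_and]
      rw [List.getElem?_modify]
      by_cases hbj : b = j
      case neg =>
        have h0 : ((fun x => if b = j then f x else x) <$> r[j]?) = r[j]? := by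
          cases r[j]? <;> simp [hbj]
        rw [h0, if_neg (by tauto)]
      case pos =>
        subst hbj
        cases hrj : r[b]? with
        | none =>
          have hlenr : r.length ≤ b := List.getElem?_eq_none_iff.mp hrj
          rw [if_neg (by rintro ⟨_, _, h4⟩; omega)]
          simp
        | some v =>
          have hlr : b < r.length := (List.getElem?_eq_some_iff.mp hrj).1
          rw [if_pos ⟨rfl, ha, hlr⟩]
          simp [hrj]


theorem Sh2_modify {α : Type} {g : List (List α)} {N M : Nat} (hs : Sh2 g N M)
    (a : Nat) (frow : List α → List α) (hf : ∀ r, r.length = M → (frow r).length = M) :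
    Sh2 (g.modify a frow) N M := by
  obtain ⟨h1, h2⟩ := hs
  refine ⟨by simpa using h1, ?_⟩
  intro r hr
  rcases Nat.lt_or_ge a g.length with ha | ha
  · rw [@List.modify_eq_set _ ⟨[]⟩ frow a g] at hr
    rcases List.mem_or_eq_of_mem_set hr with h | h
    · exact h2 r h
    · subst h
      have hgd : (g[a]?.getD (default : List α)) = g[a]'ha := by
        simp [List.getElem?_eq_getElem ha]
      rw [hgd]
      exact hf _ (h2 _ (List.getElem_mem ha))
  · have hid : g.modify a frow = g := by
      apply List.ext_getElem?
      intro k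
      rw [List.getElem?_modify]
      rcases Nat.lt_or_ge k g.length with hk | hk
      · rw [List.getElem?_eq_getElem hk]
        simp [show ¬ a = k by omega]
      · rw [List.getElem?_eq_none hk]; rfl
    rw [hid] at hr
    exact h2 r hr

-- ---- stage 0b: countP helpers ----

theorem countP_and_split {α : Type} (a b : α → Bool) (l : List α) :
    l.countP (fun x => a x && b x) + l.countP (fun x => a x && !b x) = l.countP a := by
  induction l with
  | nil => simp
  | cons x xs ih =>
    simp only [List.countP_cons]
    cases hx : a x <;> cases hbx : b x <;> simp [hx, hbx] <;> omega

theorem countP_congr_mem {α : Type} {a b : α → Bool} {l : List α}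
    (h : ∀ x ∈ l, a x = b x) : l.countP a = l.countP b := by
  induction l with
  | nil => rfl
  | cons x xs ih =>
    simp only [List.countP_cons, h x (by simp)]
    rw [ih (fun y hy => h y (by simp [hy]))]

-- ---- stage 1: the abstract closure ----

def freeN (n m : Int) (S : Int × Int → Bool) (p : Int × Int) : Nat :=
  (dirs p).countP (fun q => inGb n m q && !S q)

def baseF (n m : Int) (grid : List String) : Int × Int → Bool :=
  fun p => inGb n m p && (gridAt grid p.1 p.2 == '#')

inductive ReachF (n m : Int) (grid : List String) : (Int × Int → Bool) → Prop
  | base : ReachF n m grid (baseF n m grid)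
  | step {S : Int × Int → Bool} {p : Int × Int} : ReachF n m grid S → inGb n m p = true →
      S p = false → freeN n m S p ≤ 1 → ReachF n m grid (fun q => decide (q = p) || S q)

def ClosedIn (n m : Int) (S : Int × Int → Bool) : Prop :=
  ∀ p, inGb n m p = true → S p = false → 2 ≤ freeN n m S p

def HashSub (n m : Int) (grid : List String) (S : Int × Int → Bool) : Prop :=
  ∀ p, baseF n m grid p = true → S p = true

def EqIn (n m : Int) (S T : Int × Int → Bool) : Prop :=
  ∀ p, inGb n m p = true → S p = T p

theorem freeN_mono {n m : Int} {S T : Int × Int → Bool}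
    (h : ∀ p, inGb n m p = true → S p = true → T p = true) (p : Int × Int) :
    freeN n m T p ≤ freeN n m S p := by
  apply List.countP_mono_left
  intro q _ hq
  simp only [Bool.and_eq_true, Bool.not_eq_true'] at hq ⊢
  refine ⟨hq.1, ?_⟩
  cases hSq : S q
  · rfl
  · rw [h q hq.1 hSq] at hq; exact absurd hq.2 (by simp)

theorem freeN_congr {n m : Int} {S T : Int × Int → Bool} (h : EqIn n m S T) (p : Int × Int) :
    freeN n m S p = freeN n m T p := by
  apply countP_congr_mem
  intro q _
  cases hq : inGb n m q
  · simp [hq]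
  · simp [hq, h q hq]

theorem reach_le {n m : Int} {grid : List String} {S T : Int × Int → Bool}
    (hR : ReachF n m grid S) (hH : HashSub n m grid T) (hC : ClosedIn n m T) :
    ∀ p, inGb n m p = true → S p = true → T p = true := by
  induction hR with
  | base => intro p _ hp; exact hH p hp
  | @step S p hS hpin hpS hfree ih =>
    intro q hqin hq
    simp only [Bool.or_eq_true, decide_eq_true_eq] at hq
    rcases hq with hq | hq
    · subst hq
      by_contra hqT
      have hqT' : T q = false := by simpa using hqT
      have h2 : 2 ≤ freeN n m T q := hC q hqin hqT'
      have hmono : freeN n m T q ≤ freeN n m S q := freeN_mono ih q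
      omega
    · exact ih q hqin hq

-- extensional equality of two reachable closed supersets of the hash cells
theorem reach_ext {n m : Int} {grid : List String} {S S' T T' : Int × Int → Bool}
    (hRS : ReachF n m grid S) (hES : EqIn n m S T)
    (hHS : HashSub n m grid T) (hCS : ClosedIn n m T)
    (hRS' : ReachF n m grid S') (hES' : EqIn n m S' T')
    (hHS' : HashSub n m grid T') (hCS' : ClosedIn n m T') :
    EqIn n m T T' := by
  have hH1 : HashSub n m grid S := by
    intro p hp
    have hin : inGb n m p = true := by
      simp only [baseF, Bool.and_eq_true] at hp; exact hp.1
    rw [hES p hin]; exact hHS p hp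
  have hC1 : ClosedIn n m S := by
    intro p hp hSp
    rw [freeN_congr hES]
    exact hCS p hp (by rw [← hES p hp]; exact hSp)
  have hH2 : HashSub n m grid S' := by
    intro p hp
    have hin : inGb n m p = true := by
      simp only [baseF, Bool.and_eq_true] at hp; exact hp.1
    rw [hES' p hin]; exact hHS' p hp
  have hC2 : ClosedIn n m S' := by
    intro p hp hSp
    rw [freeN_congr hES']
    exact hCS' p hp (by rw [← hES' p hp]; exact hSp)
  intro p hp
  rw [← hES p hp, ← hES' p hp]
  have h1 := reach_le hRS hH2 hC2
  have h2 := reach_le hRS' hH1 hC1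
  cases h : S p
  · cases h' : S' p
    · rfl
    · exact absurd (h2 p hp h') (by simp [h])
  · exact (h1 p hp h).symm

-- ---- stage 2: B-side invariants ----

theorem inGb_iff {n m : Int} {p : Int × Int} :
    inGb n m p = true ↔ 0 ≤ p.1 ∧ p.1 < n ∧ 0 ≤ p.2 ∧ p.2 < m := by
  simp [inGb, and_assoc]

theorem reach_base_le {n m : Int} {grid : List String} {S : Int × Int → Bool}
    (hR : ReachF n m grid S) : ∀ p, baseF n m grid p = true → S p = true := by
  induction hR with
  | base => intro p hp; exact hp
  | step _ _ _ _ ih => intro p hp; simp [ih p hp]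

def kF (kept : List (List Bool)) : Int × Int → Bool := fun p => get2 kept p.1 p.2 false

def cnt2 (g : List (List Bool)) : Nat := (g.map (fun r => r.countP (fun b => b))).sum

theorem row_len {α : Type} {g : List (List α)} {N M i : Nat} (hs : Sh2 g N M) (hi : i < N) :
    (g[i]?.getD []).length = M := by
  obtain ⟨h1, h2⟩ := hs
  have hi' : i < g.length := by omega
  rw [List.getElem?_eq_getElem hi']
  exact h2 _ (List.getElem_mem hi')

theorem mod2_nonneg {α : Type} (g : List (List α)) {i j : Int} (hi : 0 ≤ i) (hj : 0 ≤ j)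
    (f : α → α) : mod2 g i j f = g.modify i.toNat (fun r => r.modify j.toNat f) := by
  unfold mod2
  rw [lmod_of_nonneg _ hi]
  congr 1
  funext r
  exact lmod_of_nonneg r hj f

theorem Sh2_mod2 {α : Type} {n m : Int} {g : List (List α)} (hs : Sh2 g n.toNat m.toNat)
    {p : Int × Int} (hp : inGb n m p = true) (f : α → α) :
    Sh2 (mod2 g p.1 p.2 f) n.toNat m.toNat := by
  obtain ⟨h1, h2, h3, h4⟩ := inGb_iff.mp hp
  rw [mod2_nonneg g h1 h3]
  exact Sh2_modify hs _ _ (fun r hr => by simp [hr])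

theorem kF_mod2_true {n m : Int} {kept : List (List Bool)} (hs : Sh2 kept n.toNat m.toNat)
    {p : Int × Int} (hp : inGb n m p = true) {q : Int × Int} (hq : inGb n m q = true) :
    kF (mod2 kept p.1 p.2 (fun _ => true)) q = (decide (q = p) || kF kept q) := by
  obtain ⟨hp1, hp2, hp3, hp4⟩ := inGb_iff.mp hp
  obtain ⟨hq1, hq2, hq3, hq4⟩ := inGb_iff.mp hq
  unfold kF
  rw [mod2_nonneg kept hp1 hp3, get2_eq_at2 _ hq1 hq3, at2_modify, get2_eq_at2 _ hq1 hq3]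
  by_cases hqp : q = p
  · subst hqp
    rw [if_pos ⟨rfl, rfl, by simp [hs.1]; omega, by rw [row_len hs (by omega)]; omega⟩]
    simp
  · rw [if_neg ?_]
    · simp [hqp]
    · rintro ⟨e1, e2, -, -⟩
      exact hqp (Prod.ext (by omega) (by omega))

theorem countP_set_true (r : List Bool) (b : Nat) (hb : b < r.length)
    (hrb : r[b]? = some false) :
    (r.set b true).countP (fun x => x) = r.countP (fun x => x) + 1 := by
  induction r generalizing b with
  | nil => simp at hb
  | cons x xs ih =>
    cases b with
    | zero =>
      simp only [List.getElem?_cons_zero, Option.some.injEq] at hrb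
      subst hrb
      simp [List.countP_cons]
    | succ b =>
      simp only [List.getElem?_cons_succ] at hrb
      simp only [List.set_cons_succ, List.countP_cons]
      rw [ih b (by simpa using hb) hrb]
      omega

theorem cnt2_mod2_true {n m : Int} {g : List (List Bool)} (hs : Sh2 g n.toNat m.toNat)
    {p : Int × Int} (hp : inGb n m p = true) (hv : kF g p = false) :
    cnt2 (mod2 g p.1 p.2 (fun _ => true)) = cnt2 g + 1 := by
  obtain ⟨h1, h2, h3, h4⟩ := inGb_iff.mp hp
  rw [mod2_nonneg g h1 h3]
  unfold kF at hv
  rw [get2_eq_at2 _ h1 h3] at hv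
  have ha : p.1.toNat < g.length := by rw [hs.1]; omega
  have hb : p.2.toNat < (g[p.1.toNat]?.getD []).length := by rw [row_len hs (by omega)]; omega
  clear hp hs
  clear h2 h4
  generalize p.1.toNat = a at ha hb hv ⊢
  generalize p.2.toNat = b at hb hv ⊢
  induction g generalizing a with
  | nil => simp at ha
  | cons r g ih =>
    cases a with
    | zero =>
      have hb' : b < r.length := by simpa using hb
      have hv' : r[b]? = some false := by
        unfold at2 at hv
        simp only [List.getElem?_cons_zero, Option.getD_some] at hv
        rw [List.getElem?_eq_getElem hb'] at hv ⊢
        simpa using hv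
      have hmod : (r :: g).modify 0 (fun r => r.modify b fun _ => true) =
          (r.modify b fun _ => true) :: g := by simp [List.modify]
      have hset : r.modify b (fun _ => true) = r.set b true := by
        rw [@List.modify_eq_set _ ⟨false⟩]
      rw [hmod, hset]
      unfold cnt2
      simp only [List.map_cons, List.sum_cons]
      rw [countP_set_true r b hb' hv']
      omega
    | succ a =>
      have hb' : b < (g[a]?.getD []).length := by simpa using hb
      have hv' : at2 g a b false = false := by
        unfold at2 at hv ⊢
        simpa using hv
      have hmod : (r :: g).modify (a+1) (fun r => r.modify b fun _ => true) =
          r :: g.modify a (fun r => r.modify b fun _ => true) := by simp [List.modify]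
      rw [hmod]
      unfold cnt2
      simp only [List.map_cons, List.sum_cons]
      have := ih a (by simpa using ha) hb' hv'
      unfold cnt2 at this
      omega

theorem cnt2_le {g : List (List Bool)} {N M : Nat} (hs : Sh2 g N M) : cnt2 g ≤ N * M := by
  obtain ⟨h1, h2⟩ := hs
  subst h1
  induction g with
  | nil => simp [cnt2]
  | cons r g ih =>
    unfold cnt2
    simp only [List.map_cons, List.sum_cons, List.length_cons]
    have hr : r.countP (fun b => b) ≤ M := by
      calc r.countP (fun b => b) ≤ r.length := List.countP_le_length
        _ = M := h2 r (by simp)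
    have := ih (fun r hr => h2 r (by simp [hr]))
    unfold cnt2 at this
    calc r.countP (fun b => b) + (g.map (fun r => r.countP (fun b => b))).sum
        ≤ M + g.length * M := by omega
      _ = (g.length + 1) * M := by ring

theorem innerB_spec (n m : Int) (grid : List String) (i : Int) (hi0 : 0 ≤ i) (hin : i < n) :
    ∀ (L : List Int), (∀ j ∈ L, 0 ≤ j ∧ j < m) → ∀ (st : List (List Bool) × Bool),
    Sh2 st.1 n.toNat m.toNat → (∃ S, ReachF n m grid S ∧ EqIn n m S (kF st.1)) →
    ∀ st', st' = L.foldl (fun st j =>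
        if !get2 st.1 i j false then
          if (dirs (i, j)).countP (fun p => inGb n m p && !get2 st.1 p.1 p.2 false) ≤ 1 then
            (mod2 st.1 i j (fun _ => true), true)
          else st
        else st) st →
    Sh2 st'.1 n.toNat m.toNat ∧ (∃ S, ReachF n m grid S ∧ EqIn n m S (kF st'.1)) ∧
     cnt2 st.1 ≤ cnt2 st'.1 ∧
     (st.2 = true → st'.2 = true) ∧
     (st'.2 = true → st.2 = true ∨ cnt2 st.1 + 1 ≤ cnt2 st'.1) ∧
     (st'.2 = false → st.2 = false ∧ st'.1 = st.1 ∧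
       ∀ j ∈ L, kF st.1 (i, j) = true ∨ 2 ≤ freeN n m (kF st.1) (i, j)) := by
  intro L
  induction L with
  | nil =>
    intro _ st hs hr st' hst'
    subst hst'
    exact ⟨hs, hr, le_refl _, fun h => h, fun h => Or.inl h, fun h => ⟨h, rfl, by simp⟩⟩
  | cons j L ih =>
    intro hL st hs hr st' hst'
    have hj := hL j (by simp)
    have hij : inGb n m (i, j) = true := inGb_iff.mpr ⟨hi0, hin, hj.1, hj.2⟩
    rw [List.foldl_cons] at hst'
    by_cases hk : get2 st.1 i j false
    · -- cell already kept: the step is the identity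
      rw [if_neg (by simp [hk])] at hst'
      obtain ⟨c1, c2, c3, c4, c5, c6⟩ := ih (fun j hj => hL j (by simp [hj])) st hs hr st' hst'
      refine ⟨c1, c2, c3, c4, c5, fun h => ?_⟩
      obtain ⟨d1, d2, d3⟩ := c6 h
      refine ⟨d1, d2, fun j' hj' => ?_⟩
      rcases List.mem_cons.mp hj' with h' | h'
      · subst h'; exact Or.inl hk
      · exact d3 j' h'
    · rw [if_pos (by simp [hk])] at hst'
      by_cases hfree : (dirs (i, j)).countP
          (fun p => inGb n m p && !get2 st.1 p.1 p.2 false) ≤ 1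
      · -- the cell is marked kept
        rw [if_pos hfree] at hst'
        have hkF : kF st.1 (i, j) = false := by
          unfold kF; simpa using hk
        have hfree' : freeN n m (kF st.1) (i, j) ≤ 1 := by
          simpa [freeN, kF] using hfree
        obtain ⟨S, hS, hE⟩ := hr
        have hS' : ReachF n m grid (fun q => decide (q = (i, j)) || S q) :=
          ReachF.step hS hij (by rw [hE _ hij]; exact hkF)
            (by rw [freeN_congr hE]; exact hfree')
        have hE' : EqIn n m (fun q => decide (q = (i, j)) || S q)
            (kF (mod2 st.1 i j (fun _ => true))) := by
          intro q hq
          rw [show mod2 st.1 i j (fun _ => true) = mod2 st.1 (i, j).1 (i, j).2 (fun _ => true) from rfl,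
            kF_mod2_true hs hij hq]
          by_cases hqij : q = (i, j) <;> simp [hqij, hE q hq]
        have hs1 : Sh2 (mod2 st.1 i j (fun _ => true)) n.toNat m.toNat := Sh2_mod2 hs hij (fun _ => true)
        have hc1 : cnt2 (mod2 st.1 i j (fun _ => true)) = cnt2 st.1 + 1 :=
          cnt2_mod2_true hs hij hkF
        obtain ⟨c1, c2, c3, c4, c5, c6⟩ := ih (fun j hj => hL j (by simp [hj]))
          (mod2 st.1 i j (fun _ => true), true) hs1 ⟨_, hS', hE'⟩ st' hst'
        refine ⟨c1, c2, by simp at c3; omega, fun _ => c4 rfl, fun _ => Or.inr (by simp at c3; omega),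
          fun h => absurd ((c6 h).1) (by simp)⟩
      · rw [if_neg hfree] at hst'
        obtain ⟨c1, c2, c3, c4, c5, c6⟩ := ih (fun j hj => hL j (by simp [hj])) st hs hr st' hst'
        refine ⟨c1, c2, c3, c4, c5, fun h => ?_⟩
        obtain ⟨d1, d2, d3⟩ := c6 h
        refine ⟨d1, d2, fun j' hj' => ?_⟩
        rcases List.mem_cons.mp hj' with h' | h'
        · subst h'
          refine Or.inr ?_
          have : 2 ≤ (dirs (i, j')).countP (fun p => inGb n m p && !get2 st.1 p.1 p.2 false) := by
            omega
          simpa [freeN, kF] using this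
        · exact d3 j' h'

theorem outerB_spec (n m : Int) (grid : List String) :
    ∀ (Li : List Int), (∀ i ∈ Li, 0 ≤ i ∧ i < n) → ∀ (st : List (List Bool) × Bool),
    Sh2 st.1 n.toNat m.toNat → (∃ S, ReachF n m grid S ∧ EqIn n m S (kF st.1)) →
    ∀ st', st' = Li.foldl (fun st i =>
      (PySem.List.pyRange 0 m 1).foldl (fun st j =>
        if !get2 st.1 i j false then
          if (dirs (i, j)).countP (fun p => inGb n m p && !get2 st.1 p.1 p.2 false) ≤ 1 then
            (mod2 st.1 i j (fun _ => true), true)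
          else st
        else st) st) st →
    Sh2 st'.1 n.toNat m.toNat ∧ (∃ S, ReachF n m grid S ∧ EqIn n m S (kF st'.1)) ∧
     cnt2 st.1 ≤ cnt2 st'.1 ∧
     (st'.2 = true → st.2 = true ∨ cnt2 st.1 + 1 ≤ cnt2 st'.1) ∧
     (st'.2 = false → st.2 = false ∧ st'.1 = st.1 ∧
       ∀ i ∈ Li, ∀ j : Int, 0 ≤ j → j < m →
         kF st.1 (i, j) = true ∨ 2 ≤ freeN n m (kF st.1) (i, j)) := by
  intro Li
  induction Li with
  | nil =>
    intro _ st hs hr st' hst'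
    subst hst'
    exact ⟨hs, hr, le_refl _, fun h => Or.inl h, fun h => ⟨h, rfl, by simp⟩⟩
  | cons i Li ih =>
    intro hLi st hs hr st' hst'
    have hi := hLi i (by simp)
    rw [List.foldl_cons] at hst'
    obtain ⟨c1, c2, c3, c4, c5, c6⟩ := innerB_spec n m grid i hi.1 hi.2 (PySem.List.pyRange 0 m 1)
      (fun j hj => by
        have := (PySem.List.mem_pyRange_one).mp hj
        exact ⟨this.1, this.2⟩) st hs hr _ rfl
    obtain ⟨d1, d2, d3, d4, d5⟩ := ih (fun i hi => hLi i (by simp [hi])) _ c1 c2 st' hst'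
    refine ⟨d1, d2, le_trans c3 d3, fun h => ?_, fun h => ?_⟩
    · rcases d4 h with h' | h'
      · rcases c5 h' with h'' | h''
        · exact Or.inl h''
        · exact Or.inr (by omega)
      · exact Or.inr (by omega)
    · obtain ⟨e1, e2, e3⟩ := d5 h
      obtain ⟨f1, f2, f3⟩ := c6 e1
      refine ⟨f1, by rw [e2, f2], fun i' hi' j hj0 hjm => ?_⟩
      rcases List.mem_cons.mp hi' with h' | h'
      · subst h'
        exact f3 j (PySem.List.mem_pyRange_one.mpr ⟨hj0, hjm⟩)
      · have := e3 i' h' j hj0 hjm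
        rwa [f2] at this

theorem passB_spec (n m : Int) (grid : List String) (kept : List (List Bool))
    (hs : Sh2 kept n.toNat m.toNat)
    (hr : ∃ S, ReachF n m grid S ∧ EqIn n m S (kF kept)) :
    ∀ kept' ch, passB n m (kept, false) = (kept', ch) →
    Sh2 kept' n.toNat m.toNat ∧ (∃ S, ReachF n m grid S ∧ EqIn n m S (kF kept')) ∧
    cnt2 kept ≤ cnt2 kept' ∧
    (ch = true → cnt2 kept + 1 ≤ cnt2 kept') ∧
    (ch = false → kept' = kept ∧ ClosedIn n m (kF kept)) := by
  intro kept' ch hpass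
  obtain ⟨c1, c2, c3, c4, c5⟩ := outerB_spec n m grid (PySem.List.pyRange 0 n 1)
    (fun i hi => by
      have := (PySem.List.mem_pyRange_one).mp hi
      exact ⟨this.1, this.2⟩) (kept, false) hs hr (passB n m (kept, false)) rfl
  rw [hpass] at c1 c2 c3 c4 c5
  refine ⟨c1, c2, c3, fun h => ?_, fun h => ?_⟩
  · rcases c4 h with h' | h'
    · exact absurd h' (by simp)
    · exact h'
  · obtain ⟨-, e2, e3⟩ := c5 h
    refine ⟨e2, fun p hp hkp => ?_⟩
    obtain ⟨h1, h2, h3, h4⟩ := inGb_iff.mp hp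
    have := e3 p.1 (PySem.List.mem_pyRange_one.mpr ⟨h1, h2⟩) p.2 h3 h4
    rcases this with h' | h'
    · rw [show ((p.1, p.2) : Int × Int) = p from rfl] at h'
      rw [h'] at hkp; exact absurd hkp (by simp)
    · rwa [show ((p.1, p.2) : Int × Int) = p from rfl] at h'

theorem sweepsB_spec (n m : Int) (grid : List String) :
    ∀ (fuel : Nat) (kept : List (List Bool)), Sh2 kept n.toNat m.toNat →
    (∃ S, ReachF n m grid S ∧ EqIn n m S (kF kept)) →
    n.toNat * m.toNat + 1 ≤ fuel + cnt2 kept →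
    Sh2 (sweepsB n m fuel kept) n.toNat m.toNat ∧
    (∃ S, ReachF n m grid S ∧ EqIn n m S (kF (sweepsB n m fuel kept))) ∧
    ClosedIn n m (kF (sweepsB n m fuel kept)) := by
  intro fuel
  induction fuel with
  | zero =>
    intro kept hs hr hfuel
    have := cnt2_le hs
    omega
  | succ fuel ih =>
    intro kept hs hr hfuel
    cases hpass : passB n m (kept, false) with
    | mk kept' ch =>
      obtain ⟨c1, c2, c3, c4, c5⟩ := passB_spec n m grid kept hs hr kept' ch hpass
      cases ch with
      | false =>
        obtain ⟨e1, e2⟩ := c5 rfl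
        have hred : sweepsB n m (fuel + 1) kept = kept' := by
          rw [sweepsB, hpass]
        rw [hred, e1]
        exact ⟨hs, hr, e2⟩
      | true =>
        have hred : sweepsB n m (fuel + 1) kept = sweepsB n m fuel kept' := by
          rw [sweepsB, hpass]
        rw [hred]
        exact ih kept' c1 c2 (by have := c4 rfl; omega)

-- ---- stage 3: A-side ----

def seenL (q : List (Int × Int)) : Int × Int → Bool := fun p => decide (p ∈ q)

def degN (n m : Int) (p : Int × Int) : Nat := (dirs p).countP (inGb n m)

def cntIn (p : Int × Int) (used : List (Int × Int)) : Nat :=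
  (dirs p).countP (fun c => decide (c ∈ used))

-- evidence that A aborted: a reachable set containing a '^' cell
def BadReach (n m : Int) (grid : List String) : Prop :=
  ∃ S, ReachF n m grid S ∧ ∃ p, inGb n m p = true ∧ S p = true ∧ gridAt grid p.1 p.2 = '^'

theorem nodup_dirs (c : Int × Int) : (dirs c).Nodup := by
  simp [dirs, Prod.ext_iff]
  omega

theorem dirs_symm {p c : Int × Int} : p ∈ dirs c ↔ c ∈ dirs p := by
  simp [dirs, Prod.ext_iff]
  omega

theorem countP_or_disjoint {α : Type} (a b : α → Bool) (l : List α)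
    (h : ∀ x ∈ l, ¬(a x = true ∧ b x = true)) :
    l.countP (fun x => a x || b x) = l.countP a + l.countP b := by
  induction l with
  | nil => simp
  | cons x xs ih =>
    simp only [List.countP_cons]
    have hx := h x (by simp)
    have hih := ih (fun y hy => h y (by simp [hy]))
    by_cases hax : a x = true
    · have hbx : b x = false := by
        cases hb : b x
        · rfl
        · exact absurd ⟨hax, hb⟩ hx
      simp [hax, hbx, hih]
      omega
    · have hax' : a x = false := by simpa using hax
      cases hbx : b x <;> simp [hax', hbx, hih] <;> omega

theorem freeN_seen {n m : Int} {q : List (Int × Int)} (hq : ∀ p ∈ q, inGb n m p = true)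
    (p : Int × Int) : freeN n m (seenL q) p + cntIn p q = degN n m p := by
  unfold freeN cntIn degN seenL
  have h1 : (dirs p).countP (fun c => decide (c ∈ q)) =
      (dirs p).countP (fun c => inGb n m c && decide (c ∈ q)) := by
    apply countP_congr_mem
    intro x _
    cases hx : decide (x ∈ q)
    · simp
    · simp only [decide_eq_true_eq] at hx
      simp [hq x hx]
  rw [h1, Nat.add_comm]
  exact countP_and_split (inGb n m) (fun c => decide (c ∈ q)) (dirs p)

-- all in-grid cells, and the q-length bound
def allCells (n m : Int) : List (Int × Int) :=
  (PySem.List.pyRange 0 n 1).flatMap (fun i => (PySem.List.pyRange 0 m 1).map (fun j => (i, j)))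

theorem mem_allCells {n m : Int} {p : Int × Int} : p ∈ allCells n m ↔ inGb n m p = true := by
  simp only [allCells, List.mem_flatMap, List.mem_map, PySem.List.mem_pyRange_one, inGb_iff]
  constructor
  · rintro ⟨i, ⟨hi0, hin⟩, j, ⟨hj0, hjm⟩, rfl⟩
    exact ⟨hi0, hin, hj0, hjm⟩
  · rintro ⟨h1, h2, h3, h4⟩
    exact ⟨p.1, ⟨h1, h2⟩, p.2, ⟨h3, h4⟩, rfl⟩

theorem nodup_allCells (n m : Int) : (allCells n m).Nodup := by
  have : allCells n m = (PySem.List.pyRange 0 n 1) ×ˢ (PySem.List.pyRange 0 m 1) := rfl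
  rw [this]
  exact List.Nodup.product (PySem.List.nodup_pyRange_one _ _) (PySem.List.nodup_pyRange_one _ _)

theorem length_allCells (n m : Int) : (allCells n m).length = n.toNat * m.toNat := by
  unfold allCells
  rw [List.length_flatMap]
  simp [PySem.List.length_pyRange_one]

theorem qlen_le {n m : Int} {q : List (Int × Int)} (hnd : q.Nodup)
    (hq : ∀ p ∈ q, inGb n m p = true) : q.length ≤ n.toNat * m.toNat := by
  have h1 : q.toFinset.card = q.length := List.toFinset_card_of_nodup hnd
  have h2 : q.toFinset ⊆ (allCells n m).toFinset := by
    intro p hp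
    rw [List.mem_toFinset] at hp ⊢
    exact mem_allCells.mpr (hq p hp)
  calc q.length = q.toFinset.card := h1.symm
    _ ≤ (allCells n m).toFinset.card := Finset.card_le_card h2
    _ ≤ (allCells n m).length := List.toFinset_card_le _
    _ = n.toNat * m.toNat := length_allCells n m

theorem flatMap_filter {α β : Type} (l : List α) (f : α → List β) (P : β → Bool) :
    l.flatMap (fun a => (f a).filter P) = (l.flatMap f).filter P := by
  induction l with
  | nil => simp
  | cons x xs ih => simp [List.filter_append, ih]

theorem get2_mod2 {α : Type} {n m : Int} {g : List (List α)} (hs : Sh2 g n.toNat m.toNat)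
    {p q : Int × Int} (hp : inGb n m p = true) (hq : inGb n m q = true) (f : α → α) (d : α) :
    get2 (mod2 g p.1 p.2 f) q.1 q.2 d =
      if q = p then f (get2 g q.1 q.2 d) else get2 g q.1 q.2 d := by
  obtain ⟨hp1, hp2, hp3, hp4⟩ := inGb_iff.mp hp
  obtain ⟨hq1, hq2, hq3, hq4⟩ := inGb_iff.mp hq
  rw [mod2_nonneg g hp1 hp3, get2_eq_at2 _ hq1 hq3, at2_modify, get2_eq_at2 _ hq1 hq3]
  by_cases hqp : q = p
  · subst hqp
    rw [if_pos ⟨rfl, rfl, by simp [hs.1]; omega, by rw [row_len hs (by omega)]; omega⟩,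
      if_pos rfl]
  · rw [if_neg ?_, if_neg hqp]
    rintro ⟨e1, e2, -, -⟩
    exact hqp (Prod.ext (by omega) (by omega))

theorem degN_eq {n m : Int} (h2n : 2 ≤ n) (h2m : 2 ≤ m) {p : Int × Int}
    (hp : inGb n m p = true) :
    (degN n m p : Int) = 4 - (if p.2 = 0 then 1 else 0) - (if p.2 = m - 1 then 1 else 0)
      - (if p.1 = 0 then 1 else 0) - (if p.1 = n - 1 then 1 else 0) := by
  obtain ⟨h1, h2, h3, h4⟩ := inGb_iff.mp hp
  unfold degN dirs
  simp only [List.countP_cons, List.countP_nil, inGb_iff]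
  push_cast
  split_ifs <;> omega

theorem degN_ge_two {n m : Int} (h2n : 2 ≤ n) (h2m : 2 ≤ m) {p : Int × Int}
    (hp : inGb n m p = true) : 2 ≤ degN n m p := by
  obtain ⟨h1, h2, h3, h4⟩ := inGb_iff.mp hp
  have hd := degN_eq h2n h2m hp
  have : (2 : Int) ≤ (degN n m p : Int) := by
    rw [hd]; split_ifs <;> omega
  omega

theorem pyRange0 (x : Int) :
    PySem.List.pyRange 0 x 1 = (List.range x.toNat).map (fun k : Nat => (k : Int)) := by
  rw [PySem.List.pyRange_one]
  rw [show x - 0 = x by ring]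
  apply List.map_congr_left
  intro k _
  simp

theorem at2_modify' {α : Type} {g : List (List α)} {N M : Nat} (hs : Sh2 g N M)
    (a b i j : Nat) (hi : i < N) (hj : j < M) (f : α → α) (d : α) :
    at2 (g.modify a (fun r => r.modify b f)) i j d =
      if a = i ∧ b = j then f (at2 g i j d) else at2 g i j d := by
  rw [at2_modify]
  by_cases h : a = i ∧ b = j
  · rw [if_pos ⟨h.1, h.2, by rw [hs.1]; exact hi, by rw [row_len hs hi]; exact hj⟩, if_pos h]
  · rw [if_neg (by tauto), if_neg h]

theorem Sh2_modify_row {α : Type} {g : List (List α)} {N M : Nat} (hs : Sh2 g N M)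
    (a b : Nat) (f : α → α) : Sh2 (g.modify a (fun r => r.modify b f)) N M :=
  Sh2_modify hs a _ (fun r hr => by simp [hr])

theorem modify_row_neg_one {α : Type} [Inhabited α] {g : List (List α)} {N M : Nat}
    (hs : Sh2 g N M) (k : Nat) (hk : k < N) (f : α → α) :
    g.modify k (fun r => lmod r (-1) f) = g.modify k (fun r => r.modify (M - 1) f) := by
  rw [@List.modify_eq_set _ ⟨[]⟩, @List.modify_eq_set _ ⟨[]⟩]
  congr 1
  rw [lmod_neg_one]
  exact congrArg (fun t => (g[k]?.getD []).modify (t - 1) f) (row_len hs hk)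

theorem Sh2_nei0 (N M : Nat) : Sh2 (List.replicate N (List.replicate M (4:Int))) N M :=
  ⟨by simp, by intro r hr; rw [List.eq_of_mem_replicate hr]; simp⟩

theorem at2_nei0 {N M i j : Nat} (hi : i < N) (hj : j < M) :
    at2 (List.replicate N (List.replicate M (4:Int))) i j 0 = 4 := by
  unfold at2
  rw [List.getElem?_replicate, if_pos hi]
  simp [List.getElem?_replicate, hj]

theorem fold1_char {n m : Int} (h2m : 2 ≤ m) :
    ∀ (K : Nat), K ≤ n.toNat → ∀ (g : List (List Int)), Sh2 g n.toNat m.toNat →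
    Sh2 ((List.range K).foldl (fun nei (k : Nat) =>
        lmod (lmod nei (k : Int) (fun r => lmod r 0 (· - 1))) (k : Int)
          (fun r => lmod r (-1) (· - 1))) g) n.toNat m.toNat ∧
    ∀ i j : Nat, i < n.toNat → j < m.toNat →
      at2 ((List.range K).foldl (fun nei (k : Nat) =>
        lmod (lmod nei (k : Int) (fun r => lmod r 0 (· - 1))) (k : Int)
          (fun r => lmod r (-1) (· - 1))) g) i j 0 =
        at2 g i j 0 - (if i < K ∧ j = 0 then 1 else 0)
          - (if i < K ∧ j = m.toNat - 1 then 1 else 0) := by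
  intro K
  induction K with
  | zero => intro _ g hs; exact ⟨hs, fun i j _ _ => by simp⟩
  | succ K ih =>
    intro hK g hs
    obtain ⟨c1, c2⟩ := ih (by omega) g hs
    rw [List.range_succ, List.foldl_append, List.foldl_cons, List.foldl_nil]
    set A := (List.range K).foldl (fun nei (k : Nat) =>
        lmod (lmod nei (k : Int) (fun r => lmod r 0 (· - 1))) (k : Int)
          (fun r => lmod r (-1) (· - 1))) g with hA
    have e1 : lmod A (K : Int) (fun r => lmod r 0 (· - 1)) =
        A.modify K (fun r => r.modify 0 (· - 1)) := by
      simp [lmod]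
    have hsA1 : Sh2 (A.modify K (fun r => r.modify 0 (· - 1))) n.toNat m.toNat :=
      Sh2_modify_row c1 K 0 _
    have e2 : lmod (A.modify K (fun r => r.modify 0 (· - 1))) (K : Int)
          (fun r => lmod r (-1) (· - 1)) =
        (A.modify K (fun r => r.modify 0 (· - 1))).modify K
          (fun r => r.modify (m.toNat - 1) (· - 1)) := by
      rw [lmod_of_nonneg _ (by positivity)]
      simp only [Int.toNat_natCast]
      exact modify_row_neg_one (M := m.toNat) hsA1 K (by omega) _
    rw [e1, e2]
    refine ⟨Sh2_modify_row hsA1 K _ _, fun i j hi hj => ?_⟩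
    rw [at2_modify' hsA1 K (m.toNat - 1) i j hi hj, at2_modify' c1 K 0 i j hi hj, c2 i j hi hj]
    have hM : 2 ≤ m.toNat := by omega
    split_ifs <;> omega

theorem fold2_char {n m : Int} (h2n : 2 ≤ n) :
    ∀ (K : Nat), K ≤ m.toNat → ∀ (g : List (List Int)), Sh2 g n.toNat m.toNat →
    Sh2 ((List.range K).foldl (fun nei (k : Nat) =>
        mod2 (mod2 nei 0 (k : Int) (· - 1)) (-1) (k : Int) (· - 1)) g) n.toNat m.toNat ∧
    ∀ i j : Nat, i < n.toNat → j < m.toNat →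
      at2 ((List.range K).foldl (fun nei (k : Nat) =>
        mod2 (mod2 nei 0 (k : Int) (· - 1)) (-1) (k : Int) (· - 1)) g) i j 0 =
        at2 g i j 0 - (if i = 0 ∧ j < K then 1 else 0)
          - (if i = n.toNat - 1 ∧ j < K then 1 else 0) := by
  intro K
  induction K with
  | zero => intro _ g hs; exact ⟨hs, fun i j _ _ => by simp⟩
  | succ K ih =>
    intro hK g hs
    obtain ⟨c1, c2⟩ := ih (by omega) g hs
    rw [List.range_succ, List.foldl_append, List.foldl_cons, List.foldl_nil]
    set A := (List.range K).foldl (fun nei (k : Nat) =>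
        mod2 (mod2 nei 0 (k : Int) (· - 1)) (-1) (k : Int) (· - 1)) g with hA
    have e1 : mod2 A 0 (K : Int) (· - 1) = A.modify 0 (fun r => r.modify K (· - 1)) := by
      rw [mod2_nonneg A (le_refl 0) (by positivity)]
      simp
    have hsA1 : Sh2 (A.modify 0 (fun r => r.modify K (· - 1))) n.toNat m.toNat :=
      Sh2_modify_row c1 0 K _
    have e2 : mod2 (A.modify 0 (fun r => r.modify K (· - 1))) (-1) (K : Int) (· - 1) =
        (A.modify 0 (fun r => r.modify K (· - 1))).modify (n.toNat - 1)
          (fun r => r.modify K (· - 1)) := by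
      unfold mod2
      rw [lmod_neg_one]
      have hlen : (A.modify 0 (fun r => r.modify K (· - 1))).length = n.toNat := hsA1.1
      rw [hlen]
      simp [lmod]
    rw [e1, e2]
    refine ⟨Sh2_modify_row hsA1 _ _ _, fun i j hi hj => ?_⟩
    rw [at2_modify' hsA1 (n.toNat - 1) K i j hi hj, at2_modify' c1 0 K i j hi hj, c2 i j hi hj]
    have hN : 2 ≤ n.toNat := by omega
    split_ifs <;> omega

theorem neiInit_spec (n m : Int) (h2n : 2 ≤ n) (h2m : 2 ≤ m) :
    Sh2 ((PySem.List.pyRange 0 m 1).foldl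
        (fun nei j => mod2 (mod2 nei 0 j (· - 1)) (-1) j (· - 1))
        ((PySem.List.pyRange 0 n 1).foldl
          (fun nei i => lmod (lmod nei i (fun r => lmod r 0 (· - 1))) i
            (fun r => lmod r (-1) (· - 1)))
          (List.replicate n.toNat (List.replicate m.toNat (4 : Int))))) n.toNat m.toNat ∧
    ∀ p : Int × Int, inGb n m p = true →
      get2 ((PySem.List.pyRange 0 m 1).foldl
        (fun nei j => mod2 (mod2 nei 0 j (· - 1)) (-1) j (· - 1))
        ((PySem.List.pyRange 0 n 1).foldl
          (fun nei i => lmod (lmod nei i (fun r => lmod r 0 (· - 1))) i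
            (fun r => lmod r (-1) (· - 1)))
          (List.replicate n.toNat (List.replicate m.toNat (4 : Int))))) p.1 p.2 0 =
        (degN n m p : Int) := by
  rw [pyRange0 n, pyRange0 m, List.foldl_map, List.foldl_map]
  obtain ⟨s1, v1⟩ := fold1_char (n := n) h2m n.toNat (le_refl _) _ (Sh2_nei0 _ _)
  obtain ⟨s2, v2⟩ := fold2_char (m := m) h2n m.toNat (le_refl _) _ s1
  refine ⟨s2, fun p hp => ?_⟩
  obtain ⟨h1, h2, h3, h4⟩ := inGb_iff.mp hp
  have hiN : p.1.toNat < n.toNat := by omega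
  have hjM : p.2.toNat < m.toNat := by omega
  rw [get2_eq_at2 _ h1 h3, v2 _ _ hiN hjM, v1 _ _ hiN hjM, at2_nei0 hiN hjM,
    degN_eq h2n h2m hp]
  split_ifs <;> omega

-- membership of the BFS seed list
theorem mem_q0 {n m : Int} {grid : List String} {p : Int × Int} :
    p ∈ (PySem.List.pyRange 0 n 1).flatMap (fun i =>
      ((PySem.List.pyRange 0 m 1).filter (fun j => gridAt grid i j == '#')).map
        (fun j => (i, j))) ↔ baseF n m grid p = true := by
  simp only [List.mem_flatMap, List.mem_map, List.mem_filter, PySem.List.mem_pyRange_one,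
    baseF, Bool.and_eq_true, inGb_iff]
  constructor
  · rintro ⟨i, ⟨hi0, hin⟩, j, ⟨⟨hj0, hjm⟩, hc⟩, rfl⟩
    exact ⟨⟨hi0, hin, hj0, hjm⟩, hc⟩
  · rintro ⟨⟨hi0, hin, hj0, hjm⟩, hc⟩
    exact ⟨p.1, ⟨hi0, hin⟩, p.2, ⟨⟨hj0, hjm⟩, hc⟩, rfl⟩

theorem nodup_q0 (n m : Int) (grid : List String) :
    ((PySem.List.pyRange 0 n 1).flatMap (fun i =>
      ((PySem.List.pyRange 0 m 1).filter (fun j => gridAt grid i j == '#')).map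
        (fun j => (i, j)))).Nodup := by
  have he : (PySem.List.pyRange 0 n 1).flatMap (fun i =>
      ((PySem.List.pyRange 0 m 1).filter (fun j => gridAt grid i j == '#')).map
        (fun j => (i, j))) =
      (allCells n m).filter (fun p => gridAt grid p.1 p.2 == '#') := by
    unfold allCells
    rw [← flatMap_filter]
    congr 1
    funext i
    rw [List.filter_map]
    rfl
  rw [he]
  exact (nodup_allCells n m).filter _

theorem c_not_in_take {l : List (Int × Int)} {k : Nat} {c : Int × Int}
    (hnd : l.Nodup) (hc : l[k]? = some c) : c ∉ l.take k := by
  intro hmem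
  obtain ⟨i, hi, hv⟩ := List.getElem_of_mem hmem
  have hik : i < k := by
    have h := List.length_take (i := k) (l := l)
    omega
  have hkl : k < l.length := (List.getElem?_eq_some_iff.mp hc).1
  have hil : i < l.length := by omega
  rw [List.getElem_take] at hv
  have hck : l[k] = c := by
    have := List.getElem?_eq_getElem hkl
    rw [this] at hc
    simpa using hc
  have : i = k := by
    apply List.Nodup.getElem_inj_iff hnd |>.mp
    rw [hv, hck]
  omega

theorem cntIn_snoc {p c : Int × Int} {l : List (Int × Int)} (hc : c ∉ l) :
    cntIn p (l ++ [c]) = cntIn p l + (if c ∈ dirs p then 1 else 0) := by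
  unfold cntIn
  have he : ∀ x ∈ dirs p, (decide (x ∈ l ++ [c])) =
      (decide (x ∈ l) || decide (x = c)) := by
    intro x _
    simp [List.mem_append]
  rw [countP_congr_mem he, countP_or_disjoint _ _ _ (by
    intro x _ ⟨hx1, hx2⟩
    simp only [decide_eq_true_eq] at hx1 hx2
    subst hx2
    exact hc hx1)]
  congr 1
  have hc2 : (dirs p).countP (fun x => decide (x = c)) = (dirs p).count c := by
    apply countP_congr_mem
    intro x _
    by_cases h : x = c <;> simp [h]
  rw [hc2]
  by_cases hcd : c ∈ dirs p
  · rw [if_pos hcd]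
    exact List.count_eq_one_of_mem (nodup_dirs p) hcd
  · rw [if_neg hcd]
    exact List.count_eq_zero_of_not_mem hcd

-- invariant holding between the primitive steps of A's inner neighbour loop:
-- cell c = q[k] is being processed and `done` lists the offsets already handled
def MidA (n m : Int) (grid : List String) (k : Nat) (c : Int × Int)
    (done : List (Int × Int))
    (st : List (Int × Int) × PySem.Set (Int × Int) × List (List Int)) : Prop :=
  st.2.1 = st.1 ∧ st.1.Nodup ∧
  (∀ p ∈ st.1, inGb n m p = true) ∧
  (∀ p ∈ st.1, ¬ gridAt grid p.1 p.2 = '^') ∧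
  (∃ S, ReachF n m grid S ∧ EqIn n m S (seenL st.1)) ∧
  (∀ p, baseF n m grid p = true → p ∈ st.1) ∧
  k < st.1.length ∧
  st.1[k]? = some c ∧
  Sh2 st.2.2 n.toNat m.toNat ∧
  (∀ p, inGb n m p = true → get2 st.2.2 p.1 p.2 0 =
    (degN n m p : Int) - (cntIn p (st.1.take k) : Int) - (if p ∈ done then 1 else 0)) ∧
  (∀ p, inGb n m p = true → p ∉ st.1 → 2 ≤ get2 st.2.2 p.1 p.2 0)

theorem stepA_one {n m : Int} {grid : List String} {k : Nat} {c : Int × Int}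
    {done : List (Int × Int)} {p : Int × Int}
    (hpd : p ∈ dirs c) (hpnd : p ∉ done)
    {st : List (Int × Int) × PySem.Set (Int × Int) × List (List Int)}
    (hM : MidA n m grid k c done st) :
    match stepA n m grid st p with
    | none => BadReach n m grid
    | some st' => MidA n m grid k c (done ++ [p]) st' ∧ st.1.take (k+1) = st'.1.take (k+1) := by
  obtain ⟨m1, m2, m3, m4, m5, m6, m7, m8, m9, m10, m11⟩ := hM
  unfold stepA
  by_cases hpin : inGb n m p = true
  case neg =>
    rw [if_neg hpin]
    refine ⟨⟨m1, m2, m3, m4, m5, m6, m7, m8, m9, fun q hq => ?_, m11⟩, rfl⟩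
    rw [m10 q hq]
    have : (q ∈ done ++ [p]) ↔ q ∈ done := by
      simp only [List.mem_append, List.mem_singleton]
      constructor
      · rintro (h | rfl)
        · exact h
        · exact absurd hq (by simp [hpin])
      · exact Or.inl
    by_cases hqd : q ∈ done
    · rw [if_pos hqd, if_pos (this.mpr hqd)]
    · rw [if_neg hqd, if_neg (fun hh => hqd (this.mp hh))]
  case pos =>
    rw [if_pos hpin]
    have hcmem : c ∈ st.1 := List.mem_of_getElem? m8
    have hctk : c ∉ st.1.take k := c_not_in_take m2 m8
    -- the decremented counter grid
    have hnew : ∀ q, inGb n m q = true →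
        get2 (mod2 st.2.2 p.1 p.2 (· - 1)) q.1 q.2 0 =
          (degN n m q : Int) - (cntIn q (st.1.take k) : Int)
            - (if q ∈ done then 1 else 0) - (if q = p then 1 else 0) := by
      intro q hq
      rw [get2_mod2 m9 hpin hq, m10 q hq]
      by_cases hqp : q = p
      · rw [if_pos hqp, if_pos hqp]
      · rw [if_neg hqp, if_neg hqp]; ring
    have hsh' : Sh2 (mod2 st.2.2 p.1 p.2 (· - 1)) n.toNat m.toNat := Sh2_mod2 m9 hpin _
    have hform : ∀ q, inGb n m q = true →
        get2 (mod2 st.2.2 p.1 p.2 (· - 1)) q.1 q.2 0 =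
          (degN n m q : Int) - (cntIn q (st.1.take k) : Int)
            - (if q ∈ done ++ [p] then 1 else 0) := by
      intro q hq
      rw [hnew q hq]
      by_cases hqp : q = p
      · subst hqp
        rw [if_neg hpnd, if_pos rfl, if_pos (by simp)]
        ring
      · by_cases hqd : q ∈ done
        · rw [if_pos hqd, if_neg hqp, if_pos (by simp [hqd])]
          ring
        · rw [if_neg hqd, if_neg hqp, if_neg (by simp [hqd, hqp])]
          ring
    by_cases hcond : get2 (mod2 st.2.2 p.1 p.2 (· - 1)) p.1 p.2 0 < 2 ∧
        ¬ (PySem.Set.contains st.2.1 p = true)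
    case neg =>
      rw [if_neg hcond]
      refine ⟨⟨m1, m2, m3, m4, m5, m6, m7, m8, hsh', hform, fun q hq hqs => ?_⟩, rfl⟩
      show 2 ≤ get2 (mod2 st.2.2 p.1 p.2 (· - 1)) q.1 q.2 0
      by_cases hqp : q = p
      · subst hqp
        have hnc : ¬ (PySem.Set.contains st.2.1 q = true) := by
          rw [m1, PySem.Set.contains_iff]
          simpa using hqs
        have h2v : ¬ (get2 (mod2 st.2.2 q.1 q.2 (· - 1)) q.1 q.2 0 < 2) := by
          intro hlt
          exact hcond ⟨hlt, hnc⟩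
        omega
      · rw [get2_mod2 m9 hpin hq, if_neg hqp]
        exact m11 q hq hqs
    case pos =>
      rw [if_pos hcond]
      have hpnotin : p ∉ st.1 := by
        have := hcond.2
        rw [m1, PySem.Set.contains_iff] at this
        exact this
      -- p could be added: it has at most one free neighbour right now
      have haddable : freeN n m (seenL st.1) p ≤ 1 := by
        have hv := hnew p hpin
        rw [if_neg hpnd, if_pos rfl] at hv
        have hlt := hcond.1
        rw [hv] at hlt
        have h1 : cntIn p (st.1.take k ++ [c]) = cntIn p (st.1.take k) + 1 := by
          rw [cntIn_snoc hctk, if_pos (dirs_symm.mp hpd)]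
        have h2 : cntIn p (st.1.take k ++ [c]) ≤ cntIn p st.1 := by
          unfold cntIn
          apply List.countP_mono_left
          intro x _ hx
          simp only [decide_eq_true_eq, List.mem_append, List.mem_singleton] at hx ⊢
          rcases hx with hx | rfl
          · exact List.mem_of_mem_take hx
          · exact hcmem
        have h3 := freeN_seen m3 p
        omega
      obtain ⟨S, hS, hE⟩ := m5
      have hSp : S p = false := by
        rw [hE p hpin]
        unfold seenL
        simp [hpnotin]
      have hSstep : ReachF n m grid (fun q => decide (q = p) || S q) :=
        ReachF.step hS hpin hSp (by rw [freeN_congr hE]; exact haddable)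
      by_cases hcar : (gridAt grid p.1 p.2 == '^') = true
      case pos =>
        rw [if_pos hcar]
        exact ⟨_, hSstep, p, hpin, by simp, by simpa using hcar⟩
      case neg =>
        rw [if_neg hcar]
        have hadd : PySem.Set.add st.2.1 p = st.1 ++ [p] := by
          rw [m1]
          exact PySem.Set.add_of_not_mem hpnotin
        have hknew : k < (st.1 ++ [p]).length := by
          rw [List.length_append]
          simpa using Nat.lt_succ_of_lt m7
        have htk : ∀ t : Nat, t ≤ st.1.length → (st.1 ++ [p]).take t = st.1.take t := by
          intro t ht
          rw [List.take_append_of_le_length ht]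
        refine ⟨⟨by simpa using hadd, ?_, ?_, ?_, ?_, ?_, hknew, ?_, hsh', ?_, ?_⟩, ?_⟩
        · rw [List.nodup_append]
          refine ⟨m2, by simp, ?_⟩
          intro x hx y hy
          rw [List.mem_singleton.mp hy]
          intro heq
          exact hpnotin (heq ▸ hx)
        · intro q hq
          rcases List.mem_append.mp hq with h | h
          · exact m3 q h
          · rw [List.mem_singleton.mp h]
            exact hpin
        · intro q hq
          rcases List.mem_append.mp hq with h | h
          · exact m4 q h
          · rw [List.mem_singleton.mp h]
            intro hcontra
            rw [hcontra] at hcar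
            simp at hcar
        · refine ⟨_, hSstep, fun q hq => ?_⟩
          have hEq := hE q hq
          unfold seenL at hEq ⊢
          simp only [List.mem_append, List.mem_singleton]
          by_cases h1 : q = p <;> by_cases h2 : q ∈ st.1 <;> simp [h1, h2, hEq] <;>
            simp [h1, h2] at hEq ⊢ <;> exact hEq
        · intro q hq
          exact List.mem_append.mpr (Or.inl (m6 q hq))
        · rw [List.getElem?_append_left m7]
          exact m8
        · intro q hq
          rw [show ((st.1 ++ [p], PySem.Set.add st.2.1 p,
            mod2 st.2.2 p.1 p.2 (· - 1)).1) = st.1 ++ [p] from rfl]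
          rw [htk k (le_of_lt m7)]
          exact hform q hq
        · intro q hq hqs
          have hq1 : q ∉ st.1 := fun h => hqs (List.mem_append.mpr (Or.inl h))
          have hq2 : q ≠ p := fun h => hqs (List.mem_append.mpr (Or.inr (by simp [h])))
          rw [get2_mod2 m9 hpin hq, if_neg hq2]
          exact m11 q hq hq1
        · exact (htk (k+1) (by omega)).symm

theorem foldl_bind_none {n m : Int} {grid : List String} (ds : List (Int × Int)) :
    ds.foldl (fun acc p => acc.bind (fun s => stepA n m grid s p)) none = none := by
  induction ds with
  | nil => rfl
  | cons p ds ih => simpa using ih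

theorem stepA_fold {n m : Int} {grid : List String} {k : Nat} {c : Int × Int} :
    ∀ (ds done : List (Int × Int)), dirs c = done ++ ds →
    ∀ st, MidA n m grid k c done st →
    match ds.foldl (fun acc p => acc.bind (fun s => stepA n m grid s p)) (some st) with
    | none => BadReach n m grid
    | some st' => MidA n m grid k c (dirs c) st' ∧ st.1.take (k+1) = st'.1.take (k+1) := by
  intro ds
  induction ds with
  | nil =>
    intro done hsplit st hM
    simp only [List.foldl_nil]
    rw [List.append_nil] at hsplit
    rw [← hsplit] at hM
    exact ⟨hM, trivial⟩
  | cons p ds ih =>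
    intro done hsplit st hM
    have hnd : (done ++ p :: ds).Nodup := by rw [← hsplit]; exact nodup_dirs c
    have hpd : p ∈ dirs c := by rw [hsplit]; simp
    have hpnd : p ∉ done := by
      intro hp
      rw [List.nodup_append] at hnd
      exact hnd.2.2 p hp p (by simp) rfl
    have hone := stepA_one hpd hpnd hM
    rw [List.foldl_cons]
    simp only [Option.bind_some]
    cases hstep : stepA n m grid st p with
    | none =>
      rw [hstep] at hone
      rw [foldl_bind_none]
      exact hone
    | some st1 =>
      rw [hstep] at hone
      obtain ⟨hM1, htake⟩ := hone
      have hsplit' : dirs c = (done ++ [p]) ++ ds := by rw [hsplit]; simp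
      have := ih (done ++ [p]) hsplit' st1 hM1
      cases hres : ds.foldl (fun acc p => acc.bind (fun s => stepA n m grid s p)) (some st1) with
      | none => rw [hres] at this; exact this
      | some st2 =>
        rw [hres] at this
        exact ⟨this.1, htake.trans this.2⟩

def InvA (n m : Int) (grid : List String) (k : Nat)
    (st : List (Int × Int) × PySem.Set (Int × Int) × List (List Int)) : Prop :=
  st.2.1 = st.1 ∧ st.1.Nodup ∧
  (∀ p ∈ st.1, inGb n m p = true) ∧
  (∀ p ∈ st.1, ¬ gridAt grid p.1 p.2 = '^') ∧
  (∃ S, ReachF n m grid S ∧ EqIn n m S (seenL st.1)) ∧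
  (∀ p, baseF n m grid p = true → p ∈ st.1) ∧
  k ≤ st.1.length ∧
  Sh2 st.2.2 n.toNat m.toNat ∧
  (∀ p, inGb n m p = true → get2 st.2.2 p.1 p.2 0 =
    (degN n m p : Int) - (cntIn p (st.1.take k) : Int)) ∧
  (∀ p, inGb n m p = true → p ∉ st.1 → 2 ≤ get2 st.2.2 p.1 p.2 0)

def FinA (n m : Int) (grid : List String)
    (st : List (Int × Int) × PySem.Set (Int × Int) × List (List Int)) : Prop :=
  st.2.1 = st.1 ∧
  (∀ p ∈ st.1, inGb n m p = true) ∧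
  (∀ p ∈ st.1, ¬ gridAt grid p.1 p.2 = '^') ∧
  (∃ S, ReachF n m grid S ∧ EqIn n m S (seenL st.1)) ∧
  (∀ p, baseF n m grid p = true → p ∈ st.1) ∧
  ClosedIn n m (seenL st.1)

theorem invA_exit {n m : Int} {grid : List String} {k : Nat}
    {st : List (Int × Int) × PySem.Set (Int × Int) × List (List Int)}
    (hI : InvA n m grid k st) (hk : st.1.length ≤ k) : FinA n m grid st := by
  obtain ⟨m1, m2, m3, m4, m5, m6, m7, m8, m9, m10⟩ := hI
  refine ⟨m1, m3, m4, m5, m6, fun p hp hps => ?_⟩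
  have hform := m9 p hp
  rw [List.take_of_length_le hk] at hform
  have hsafe : 2 ≤ get2 st.2.2 p.1 p.2 0 := by
    apply m10 p hp
    unfold seenL at hps
    simpa using hps
  rw [hform] at hsafe
  have hfc := freeN_seen m3 p
  unfold cntIn at hfc hsafe
  omega

theorem bfsA_spec {n m : Int} {grid : List String} :
    ∀ (fuel k : Nat) st, InvA n m grid k st → n.toNat * m.toNat ≤ k + fuel →
    match bfsA n m grid fuel k st with
    | none => BadReach n m grid
    | some st' => FinA n m grid st' := by
  intro fuel
  induction fuel with
  | zero =>
    intro k st hI hf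
    have hlen : st.1.length ≤ n.toNat * m.toNat := qlen_le hI.2.1 hI.2.2.1
    exact invA_exit hI (by omega)
  | succ fuel ih =>
    intro k st hI hf
    cases hget : st.1[k]? with
    | none =>
      have hb : bfsA n m grid (fuel+1) k st = some st := by
        rw [bfsA, show PySem.List.pyGet? st.1 (k : Int) = st.1[k]? from
          PySem.List.pyGet?_natCast _ _, hget]
      rw [hb]
      exact invA_exit hI (List.getElem?_eq_none_iff.mp hget)
    | some c =>
      have hb : bfsA n m grid (fuel+1) k st =
          (match (dirs c).foldl (fun acc p => acc.bind fun s => stepA n m grid s p) (some st) with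
           | none => none
           | some st' => bfsA n m grid fuel (k+1) st') := by
        rw [bfsA, show PySem.List.pyGet? st.1 (k : Int) = st.1[k]? from
          PySem.List.pyGet?_natCast _ _, hget]
      rw [hb]
      obtain ⟨m1, m2, m3, m4, m5, m6, m7, m8, m9, m10⟩ := hI
      have hklen : k < st.1.length := (List.getElem?_eq_some_iff.mp hget).1
      have hMid : MidA n m grid k c [] st :=
        ⟨m1, m2, m3, m4, m5, m6, hklen, hget, m8,
          fun p hp => by rw [m9 p hp]; simp, m10⟩
      have hfold := stepA_fold (dirs c) [] (by simp) st hMid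
      cases hres : (dirs c).foldl (fun acc p => acc.bind (fun s => stepA n m grid s p))
          (some st) with
      | none =>
        rw [hres] at hfold
        exact hfold
      | some st1 =>
        rw [hres] at hfold
        obtain ⟨⟨w1, w2, w3, w4, w5, w6, w7, w8, w9, w10, w11⟩, htake⟩ := hfold
        have hc_take : c ∉ st1.1.take k := c_not_in_take w2 w8
        have hI1 : InvA n m grid (k+1) st1 := by
          refine ⟨w1, w2, w3, w4, w5, w6, w7, w9, fun p hp => ?_, w11⟩
          rw [w10 p hp]
          have htk1 : st1.1.take (k+1) = st1.1.take k ++ [c] := by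
            rw [List.take_succ, w8]
            rfl
          rw [htk1, cntIn_snoc hc_take]
          have hsymm : (p ∈ dirs c) ↔ (c ∈ dirs p) := dirs_symm
          by_cases hpc : p ∈ dirs c
          · rw [if_pos hpc, if_pos (hsymm.mp hpc)]
            push_cast
            ring
          · rw [if_neg hpc, if_neg (fun h => hpc (hsymm.mpr h))]
            push_cast
            ring
        exact ih (k+1) st1 hI1 (by omega)

-- ---- stage 4: initial states, empty-run helpers, verdict bridge ----

theorem kept0_spec (n m : Int) (grid : List String) :
    Sh2 ((PySem.List.pyRange 0 n 1).map (fun i =>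
      (PySem.List.pyRange 0 m 1).map (fun j => gridAt grid i j == '#'))) n.toNat m.toNat ∧
    EqIn n m (baseF n m grid) (kF ((PySem.List.pyRange 0 n 1).map (fun i =>
      (PySem.List.pyRange 0 m 1).map (fun j => gridAt grid i j == '#')))) := by
  constructor
  · constructor
    · simp [PySem.List.length_pyRange_one]
    · intro r hr
      obtain ⟨i, _, rfl⟩ := List.mem_map.mp hr
      simp [PySem.List.length_pyRange_one]
  · intro p hp
    obtain ⟨h1, h2, h3, h4⟩ := inGb_iff.mp hp
    unfold baseF kF
    rw [hp, Bool.true_and, get2_eq_at2 _ h1 h3]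
    unfold at2
    rw [pyRange0 n, pyRange0 m]
    simp only [List.map_map]
    have hiN : p.1.toNat < n.toNat := by omega
    have hjM : p.2.toNat < m.toNat := by omega
    rw [List.getElem?_map, List.getElem?_range hiN]
    simp only [Option.map_some, Option.getD_some, Function.comp_apply]
    rw [List.getElem?_map, List.getElem?_range hjM]
    simp only [Option.map_some, Option.getD_some, Function.comp_apply]
    rw [Int.toNat_of_nonneg h1, Int.toNat_of_nonneg h3]

theorem invA0 {n m : Int} {grid : List String} (h2n : 2 ≤ n) (h2m : 2 ≤ m) :
    InvA n m grid 0
      ((PySem.List.pyRange 0 n 1).flatMap (fun i =>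
        ((PySem.List.pyRange 0 m 1).filter (fun j => gridAt grid i j == '#')).map
          (fun j => (i, j))),
      PySem.Set.ofList ((PySem.List.pyRange 0 n 1).flatMap (fun i =>
        ((PySem.List.pyRange 0 m 1).filter (fun j => gridAt grid i j == '#')).map
          (fun j => (i, j)))),
      (PySem.List.pyRange 0 m 1).foldl
        (fun nei j => mod2 (mod2 nei 0 j (· - 1)) (-1) j (· - 1))
        ((PySem.List.pyRange 0 n 1).foldl
          (fun nei i => lmod (lmod nei i (fun r => lmod r 0 (· - 1))) i
            (fun r => lmod r (-1) (· - 1)))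
          (List.replicate n.toNat (List.replicate m.toNat (4 : Int))))) := by
  have hnd := nodup_q0 n m grid
  obtain ⟨hsh, hval⟩ := neiInit_spec n m h2n h2m
  refine ⟨by exact PySem.Set.ofList_eq_self_of_nodup _ hnd, by exact hnd, ?_, ?_, ?_, ?_,
    by simp, by exact hsh, ?_, ?_⟩
  · intro p hp
    have := mem_q0.mp hp
    unfold baseF at this
    exact (Bool.and_eq_true _ _).mp this |>.1
  · intro p hp hcontra
    have := mem_q0.mp hp
    unfold baseF at this
    have hc := (Bool.and_eq_true _ _).mp this |>.2
    rw [hcontra] at hc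
    simp at hc
  · refine ⟨baseF n m grid, ReachF.base, fun p hp => ?_⟩
    unfold seenL
    have : (p ∈ (PySem.List.pyRange 0 n 1).flatMap (fun i =>
      ((PySem.List.pyRange 0 m 1).filter (fun j => gridAt grid i j == '#')).map
        (fun j => (i, j)))) ↔ baseF n m grid p = true := mem_q0
    by_cases hb : baseF n m grid p = true
    · simp [hb, this.mpr hb]
    · have : ¬ (p ∈ _) := fun h => hb (this.mp h)
      simp only [baseF] at hb ⊢
      rw [decide_eq_false this]
      cases hx : (inGb n m p && (gridAt grid p.1 p.2 == '#'))
      · rfl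
      · exact absurd hx hb
  · intro p hp
    exact mem_q0.mpr hp
  · intro p hp
    rw [hval p hp]
    simp [cntIn]
  · intro p hp hmem
    rw [hval p hp]
    have := degN_ge_two h2n h2m hp
    omega

-- B's final '^'-check as an existence statement
theorem checkB_iff {n m : Int} {grid : List String} {kept : List (List Bool)} :
    ((PySem.List.pyRange 0 n 1).any (fun i =>
        (PySem.List.pyRange 0 m 1).any (fun j =>
          get2 kept i j false && (gridAt grid i j == '^')))) = true ↔
      ∃ p : Int × Int, inGb n m p = true ∧ kF kept p = true ∧ gridAt grid p.1 p.2 = '^' := by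
  simp only [List.any_eq_true, PySem.List.mem_pyRange_one, Bool.and_eq_true, beq_iff_eq]
  constructor
  · rintro ⟨i, ⟨hi0, hin⟩, j, ⟨hj0, hjm⟩, hk, hc⟩
    exact ⟨(i, j), inGb_iff.mpr ⟨hi0, hin, hj0, hjm⟩, hk, hc⟩
  · rintro ⟨p, hp, hk, hc⟩
    obtain ⟨h1, h2, h3, h4⟩ := inGb_iff.mp hp
    exact ⟨p.1, ⟨h1, h2⟩, p.2, ⟨h3, h4⟩, hk, hc⟩

-- A's BFS run from the empty queue is a no-op (the n ≤ 0, m ≤ 0 case)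
theorem bfsA_nil {n m : Int} {grid : List String} (fuel k : Nat)
    (s : PySem.Set (Int × Int)) (g : List (List Int)) :
    bfsA n m grid fuel k ([], s, g) = some ([], s, g) := by
  cases fuel with
  | zero => rfl
  | succ fuel =>
    rw [bfsA]
    rw [show PySem.List.pyGet? ([] : List (Int × Int)) ((k : Nat) : Int) = none from
      by rw [PySem.List.pyGet?_natCast]; simp]

-- B's sweep loop over an empty row range is a no-op (the n ≤ 0, m ≤ 0 case)
theorem sweepsB_empty {n m : Int} (h : PySem.List.pyRange 0 n 1 = []) :
    ∀ fuel, sweepsB n m fuel [] = [] := by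
  intro fuel
  cases fuel with
  | zero => rfl
  | succ fuel =>
    rw [sweepsB]
    rw [show passB n m ([], false) = ([], false) from by unfold passB; rw [h]; rfl]

-- ===== VERDICT (by name: the statement is the Claim_ definition above) =====
theorem solve_spec : Claim_equal_solve := by
  unfold Claim_equal_solve
  intro n m grid _ hpre
  unfold Spec_solve
  by_cases h1 : n = 1 ∨ m = 1
  · unfold solve solve_alt
    rw [if_pos h1, if_pos h1]
  · unfold Pre_solve at hpre
    rw [if_neg h1] at hpre
    by_cases h2 : 2 ≤ n ∧ 2 ≤ m
    case neg =>
      rw [if_neg h2] at hpre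
      obtain ⟨hn0, hm0⟩ := hpre
      have hrn : PySem.List.pyRange 0 n 1 = [] := PySem.List.pyRange_one_eq_nil (by omega)
      have hrm : PySem.List.pyRange 0 m 1 = [] := PySem.List.pyRange_one_eq_nil (by omega)
      unfold solve solve_alt
      rw [if_neg h1, if_neg h1]
      simp only [hrn, hrm, List.flatMap_nil, List.foldl_nil, List.map_nil, List.any_nil,
        bfsA_nil, sweepsB_empty hrn, Bool.false_eq_true, if_false]
    case pos =>
      rw [if_pos h2] at hpre
      obtain ⟨h2n, h2m⟩ := h2
      -- B's final kept grid and its properties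
      obtain ⟨hks, hkE⟩ := kept0_spec n m grid
      obtain ⟨hsK, ⟨SB, hSB, hEB⟩, hCB⟩ := sweepsB_spec n m grid (n.toNat * m.toNat + 2)
        ((PySem.List.pyRange 0 n 1).map (fun i =>
          (PySem.List.pyRange 0 m 1).map (fun j => gridAt grid i j == '#'))) hks
        ⟨baseF n m grid, ReachF.base, hkE⟩ (by omega)
      have hHB : HashSub n m grid (kF (sweepsB n m (n.toNat * m.toNat + 2)
          ((PySem.List.pyRange 0 n 1).map (fun i =>
            (PySem.List.pyRange 0 m 1).map (fun j => gridAt grid i j == '#'))))) := by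
        intro p hp
        have hpin : inGb n m p = true := by
          unfold baseF at hp
          exact (Bool.and_eq_true _ _).mp hp |>.1
        rw [← hEB p hpin]
        exact reach_base_le hSB p hp
      -- A's BFS run
      have hbfs := bfsA_spec (grid := grid) (n.toNat * m.toNat + 1) 0 _ (invA0 h2n h2m)
        (by omega)
      unfold solve solve_alt
      rw [if_neg h1, if_neg h1]
      dsimp only []
      rcases hres : bfsA n m grid (n.toNat * m.toNat + 1) 0
        ((PySem.List.pyRange 0 n 1).flatMap (fun i =>
          ((PySem.List.pyRange 0 m 1).filter (fun j => gridAt grid i j == '#')).map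
            (fun j => (i, j))),
        PySem.Set.ofList ((PySem.List.pyRange 0 n 1).flatMap (fun i =>
          ((PySem.List.pyRange 0 m 1).filter (fun j => gridAt grid i j == '#')).map
            (fun j => (i, j)))),
        (PySem.List.pyRange 0 m 1).foldl
          (fun nei j => mod2 (mod2 nei 0 j (· - 1)) (-1) j (· - 1))
          ((PySem.List.pyRange 0 n 1).foldl
            (fun nei i => lmod (lmod nei i (fun r => lmod r 0 (· - 1))) i
              (fun r => lmod r (-1) (· - 1)))
            (List.replicate n.toNat (List.replicate m.toNat (4 : Int))))) with _ | st'
      case none =>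
        rw [hres] at hbfs
        have hbad : BadReach n m grid := hbfs
        obtain ⟨S, hS, p, hpin, hSp, hcar⟩ := hbad
        have hkp := reach_le hS hHB hCB p hpin hSp
        rw [if_pos (checkB_iff.mpr ⟨p, hpin, hkp, hcar⟩)]
      case some =>
        rw [hres] at hbfs
        obtain ⟨q, seen, nei⟩ := st'
        have hfin : FinA n m grid (q, seen, nei) := hbfs
        obtain ⟨f1, f3, f4, ⟨SA, hSA, hEA⟩, f6, fC⟩ := hfin
        have f1' : seen = q := f1
        have hHA : HashSub n m grid (seenL q) := by
          intro p hp
          unfold seenL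
          simpa using f6 p hp
        have hEall : EqIn n m (seenL q) (kF (sweepsB n m (n.toNat * m.toNat + 2)
            ((PySem.List.pyRange 0 n 1).map (fun i =>
              (PySem.List.pyRange 0 m 1).map (fun j => gridAt grid i j == '#'))))) :=
          reach_ext hSA hEA hHA fC hSB hEB hHB hCB
        have hchk : ¬ (((PySem.List.pyRange 0 n 1).any (fun i =>
            (PySem.List.pyRange 0 m 1).any (fun j =>
              get2 (sweepsB n m (n.toNat * m.toNat + 2)
                ((PySem.List.pyRange 0 n 1).map (fun i =>
                  (PySem.List.pyRange 0 m 1).map (fun j => gridAt grid i j == '#'))))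
                i j false && (gridAt grid i j == '^')))) = true) := by
          intro h
          obtain ⟨p, hp, hkp, hcar⟩ := checkB_iff.mp h
          have hseen : seenL q p = true := by rw [hEall p hp]; exact hkp
          have hpq : p ∈ q := by
            unfold seenL at hseen
            simpa using hseen
          exact f4 p hpq hcar
        rw [if_neg hchk]
        dsimp only []
        have hrender : (PySem.List.pyRange 0 n 1).foldl (fun g i =>
            (PySem.List.pyRange 0 m 1).foldl (fun g j =>
              if ¬ (PySem.Set.contains seen (i, j) = true) then mod2 g i j (fun _ => '^')
              else g) g) (grid.map (fun row => row.toList)) =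
          (PySem.List.pyRange 0 n 1).foldl (fun g i =>
            (PySem.List.pyRange 0 m 1).foldl (fun g j =>
              if ¬ (get2 (sweepsB n m (n.toNat * m.toNat + 2)
                  ((PySem.List.pyRange 0 n 1).map (fun i =>
                    (PySem.List.pyRange 0 m 1).map (fun j => gridAt grid i j == '#'))))
                  i j false = true) then mod2 g i j (fun _ => '^')
              else g) g) (grid.map (fun row => row.toList)) := by
          apply PySem.List.foldl_congr_mem
          intro acc i hi
          apply PySem.List.foldl_congr_mem
          intro acc2 j hj
          obtain ⟨hi0, hin⟩ := PySem.List.mem_pyRange_one.mp hi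
          obtain ⟨hj0, hjm⟩ := PySem.List.mem_pyRange_one.mp hj
          have hij : inGb n m (i, j) = true := inGb_iff.mpr ⟨hi0, hin, hj0, hjm⟩
          have hcond : PySem.Set.contains seen (i, j) =
              get2 (sweepsB n m (n.toNat * m.toNat + 2)
                ((PySem.List.pyRange 0 n 1).map (fun i =>
                  (PySem.List.pyRange 0 m 1).map (fun j => gridAt grid i j == '#'))))
                i j false := by
            have := hEall (i, j) hij
            unfold seenL kF at this
            rw [f1']
            rw [← this]
            rw [Bool.eq_iff_iff]
            rw [PySem.Set.contains_iff]
            simp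
          rw [hcond]
        rw [hrender]
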